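-- pv_equiv track=rewrite | github.com/truly-not-taken/aoc2015 | 1/solvepuzzle.py | imperative
-- ===== SOURCE A (Python) =====
-- def imperative(puzzle):
--     """Solve part 2 the boring way."""
--     floor = 0
--     position = 0
--     for character in puzzle:
--         position += 1
--         if character == '(':
--             floor += 1
--         if character == ')':
--             floor -= 1
--         if floor == -1:
--             return position
-- ===== SOURCE B (Python) =====
-- def imperative(puzzle):
--     """Solve part 2 the boring way."""
--     deltas = [1 if c == '(' else -1 if c == ')' else 0 for c in puzzle]
--     floors = []
--     total = 0
--     for d in deltas:
--         total += d
--         floors.append(total)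
--     for i, f in enumerate(floors, 1):
--         if f == -1:
--             return i
--     return None
-- ===== Notes on version B (the rewrite author's own statement) =====
-- stated objective: alternative
-- what changed: B first maps each character to a delta, materialises the full running-floor prefix-sum list, and then scans that list for the first value -1, instead of A's single inlined loop with early return.
import Mathlib
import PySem

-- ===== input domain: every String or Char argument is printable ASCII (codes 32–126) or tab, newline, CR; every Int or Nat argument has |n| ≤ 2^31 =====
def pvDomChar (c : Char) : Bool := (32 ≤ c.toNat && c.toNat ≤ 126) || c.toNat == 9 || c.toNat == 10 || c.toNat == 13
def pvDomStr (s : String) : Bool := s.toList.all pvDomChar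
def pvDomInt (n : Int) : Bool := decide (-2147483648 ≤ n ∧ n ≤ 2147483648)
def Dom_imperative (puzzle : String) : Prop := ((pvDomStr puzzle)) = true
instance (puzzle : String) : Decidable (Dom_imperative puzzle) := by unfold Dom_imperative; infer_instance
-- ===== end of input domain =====

-- B is an alternative decomposition (build delta list, prefix-sum it, scan for -1) of A's single early-return loop; same O(n) cost.

-- ===== PORT A =====
-- A's loop: position/floor state updated per character, early return when floor hits -1.
def imperativeLoop : List Char → Int → Int → Option Int
  | [], _, _ => none
  | c :: rest, floor, position =>
    let position := position + 1
    let floor := if c = '(' then floor + 1 else floor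
    let floor := if c = ')' then floor - 1 else floor
    if floor = -1 then some position else imperativeLoop rest floor position

def imperative (puzzle : String) : Option Int :=
  imperativeLoop puzzle.toList 0 0

-- ===== PORT B =====
-- floors: prefix sums of the deltas, started at `total`
def bFloors : List Int → Int → List Int
  | [], _ => []
  | d :: rest, total => (total + d) :: bFloors rest (total + d)

-- scan enumerate(floors, i) for the first f = -1
def bFind : List Int → Int → Option Int
  | [], _ => none
  | f :: rest, i => if f = -1 then some i else bFind rest (i + 1)

def imperative_alt (puzzle : String) : Option Int :=
  let deltas := puzzle.toList.map (fun c => if c = '(' then (1 : Int) else if c = ')' then -1 else 0)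
  bFind (bFloors deltas 0) 1

-- ===== PRECONDITION & SPEC =====
def Spec_imperative (puzzle : String) (out : Option Int) : Prop := out = imperative_alt puzzle
instance (puzzle : String) (out : Option Int) : Decidable (Spec_imperative puzzle out) := by unfold Spec_imperative; infer_instance

-- ===== CLAIM (what is proved, stated in full; the proofs are below) =====
def Claim_equal_imperative : Prop := ∀ (puzzle : String), Dom_imperative puzzle → Spec_imperative puzzle (imperative puzzle)

-- ===== LEMMAS AND PROOFS =====
theorem imperativeLoop_eq (cs : List Char) : ∀ (floor pos : Int),
    imperativeLoop cs floor pos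
      = bFind (bFloors (cs.map (fun c => if c = '(' then (1 : Int) else if c = ')' then -1 else 0)) floor) (pos + 1) := by
  induction cs with
  | nil => intro floor pos; rfl
  | cons c rest ih =>
    intro floor pos
    have hd : (if c = ')' then (if c = '(' then floor + 1 else floor) - 1
               else if c = '(' then floor + 1 else floor)
            = floor + (if c = '(' then (1 : Int) else if c = ')' then -1 else 0) := by
      by_cases h2 : c = ')'
      · subst h2; simp [sub_eq_add_neg]
      · by_cases h1 : c = '(' <;> simp [h1, h2]
    simp only [imperativeLoop, List.map, bFloors, bFind, hd]
    generalize (if c = '(' then (1 : Int) else if c = ')' then -1 else 0) = d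
    split_ifs with h
    · rfl
    · exact ih (floor + d) (pos + 1)

-- ===== VERDICT (by name: the statement is the Claim_ definition above) =====
theorem imperative_spec : Claim_equal_imperative := by
  intro puzzle _
  unfold Spec_imperative imperative imperative_alt
  simpa using imperativeLoop_eq puzzle.toList 0 0
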